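-- pv_equiv track=rewrite | github.com/pastormt/March-Madness-Predictions | analysis.py | seeds_after_first_four
-- ===== SOURCE A (Python) =====
-- import copy
--
-- def seeds_after_first_four(seeds, winning_first_four):
--     adjusted_seeds = copy.deepcopy(seeds)
--     for winning_teamID, trimmed_seed in winning_first_four.items():
--         for teamID, seed in seeds.items(): #original seeds
--             if seed[:-1] == trimmed_seed:
--                 if teamID != winning_teamID:
--                     # this is the losing team... remove it
--                     del adjusted_seeds[teamID]
--                 else:
--                     adjusted_seeds[teamID] = trimmed_seed # remove the 'a' or 'b' from the end of the seed
--
--     return adjusted_seeds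
-- ===== SOURCE B (Python) =====
-- import copy
--
-- def seeds_after_first_four(seeds, winning_first_four):
--     # reverse index: trimmed_seed -> winning teamID
--     winner_of = {trimmed: teamID for teamID, trimmed in winning_first_four.items()}
--     result = {}
--     for teamID, seed in seeds.items():
--         trimmed = seed[:-1]
--         if trimmed in winner_of:
--             if winner_of[trimmed] == teamID:
--                 result[teamID] = trimmed
--         else:
--             result[teamID] = copy.deepcopy(seed)
--     return result
-- ===== Notes on version B (the rewrite author's own statement) =====
-- stated objective: alternative
-- what changed: A rescans the whole seeds dict for every first-four entry and deletes/rewrites inside a deepcopy; B builds one reverse index trimmed_seed->winner and makes a single pass over seeds, emitting each team kept, trimmed, or dropped into a fresh dict (O(|W|+|S|) instead of O(|W|*|S|) dictionary operations, though speed was not measured here).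
-- outside the precondition, e.g. on seeds_after_first_four({1: '16a', 2: '16b', 3: '16c'}, {1: '16', 2: '16'}): A raises KeyError, B returns {2: '16'}
import Mathlib
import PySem

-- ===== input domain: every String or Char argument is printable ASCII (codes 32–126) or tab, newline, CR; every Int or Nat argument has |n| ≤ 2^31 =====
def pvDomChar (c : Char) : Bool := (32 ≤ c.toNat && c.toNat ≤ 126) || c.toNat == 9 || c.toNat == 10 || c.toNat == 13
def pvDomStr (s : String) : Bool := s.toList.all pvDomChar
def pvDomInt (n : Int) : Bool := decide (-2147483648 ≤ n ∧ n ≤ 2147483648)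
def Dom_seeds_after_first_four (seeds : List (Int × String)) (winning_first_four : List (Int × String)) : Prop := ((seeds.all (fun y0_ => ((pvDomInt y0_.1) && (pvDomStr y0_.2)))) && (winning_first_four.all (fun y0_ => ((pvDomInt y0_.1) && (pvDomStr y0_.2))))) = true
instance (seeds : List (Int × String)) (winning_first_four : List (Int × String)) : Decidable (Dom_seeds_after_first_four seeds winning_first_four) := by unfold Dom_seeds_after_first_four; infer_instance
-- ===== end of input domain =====

-- B replaces A's nested loops (for each first-four entry, rescan all seeds and delete/rewrite in a
-- deep copy) by ONE reverse index trimmed_seed -> winner and ONE pass over seeds building a fresh dict.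


-- ===== PORT A =====
-- seed[:-1] (shared by both ports: both Pythons compute seed[:-1])
def safTrim (s : String) : String := PySem.Str.slice s none (some (-1))

def seeds_after_first_four (seeds : List (Int × String)) (winning_first_four : List (Int × String)) : List (Int × String) :=
  (winning_first_four.foldl
    (fun adjusted wt =>
      seeds.foldl
        (fun adj p =>
          if safTrim p.2 == wt.2 then
            if p.1 != wt.1 then adj.erase p.1
            else adj.insert p.1 wt.2
          else adj)
        adjusted)
    (PySem.Dict.mk seeds)).items

-- ===== PORT B =====
def seeds_after_first_four_alt (seeds : List (Int × String)) (winning_first_four : List (Int × String)) : List (Int × String) :=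
  let winnerOf : PySem.Dict String Int :=
    winning_first_four.foldl (fun d wt => d.insert wt.2 wt.1) (PySem.Dict.mk [])
  (seeds.foldl
    (fun result p =>
      match winnerOf.get? (safTrim p.2) with
      | some w => if w == p.1 then result.insert p.1 (safTrim p.2) else result
      | none => result.insert p.1 p.2)
    (PySem.Dict.mk ([] : List (Int × String)))).items

-- ===== PRECONDITION & SPEC =====
-- Pre_ excludes seeds lists with duplicate teamIDs (not representable as a Python dict) and
-- winning_first_four entries whose trimmed_seed is duplicated AND matched by some seed, on which
-- A either raises KeyError (the losing team is deleted twice) or the delete/re-insert order of the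
-- colliding entries is accidental (re-inserted winners move to the end, or the surviving winner is
-- decided by entry order).
def Pre_seeds_after_first_four (seeds : List (Int × String)) (winning_first_four : List (Int × String)) : Prop :=
  (seeds.map (·.1)).Nodup ∧
  ((winning_first_four.filter (fun wt => seeds.any (fun p => safTrim p.2 == wt.2))).map (·.2)).Nodup
instance (seeds : List (Int × String)) (winning_first_four : List (Int × String)) : Decidable (Pre_seeds_after_first_four seeds winning_first_four) := by unfold Pre_seeds_after_first_four; infer_instance

def pvWitness_seeds_after_first_four : (List (Int × String)) × (List (Int × String)) :=
  ([(1, "16a"), (2, "16b"), (3, "9")], [(1, "16")])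

def Spec_seeds_after_first_four (seeds : List (Int × String)) (winning_first_four : List (Int × String)) (out : List (Int × String)) : Prop := out = seeds_after_first_four_alt seeds winning_first_four
instance (seeds : List (Int × String)) (winning_first_four : List (Int × String)) (out : List (Int × String)) : Decidable (Spec_seeds_after_first_four seeds winning_first_four out) := by unfold Spec_seeds_after_first_four; infer_instance

-- ===== CLAIM (what is proved, stated in full; the proofs are below) =====
def Claim_equal_seeds_after_first_four : Prop := ∀ (seeds : List (Int × String)) (winning_first_four : List (Int × String)), Dom_seeds_after_first_four seeds winning_first_four → Pre_seeds_after_first_four seeds winning_first_four → Spec_seeds_after_first_four seeds winning_first_four (seeds_after_first_four seeds winning_first_four)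

-- ===== LEMMAS AND PROOFS =====

-- the per-pair decision accumulated by A's outer loop
def safStepF (f : Int × String → Option (Int × String)) (wt : Int × String) :
    Int × String → Option (Int × String) :=
  fun p => if safTrim p.2 == wt.2 then (if p.1 != wt.1 then none else some (p.1, wt.2)) else f p

-- first-four entries that no seed matches are no-ops for A and invisible to B's lookups
lemma saf_find_filter {α : Type} (q pred : α → Bool) (h : ∀ x, q x = true → pred x = true) :
    ∀ (W : List α), (W.filter pred).find? q = W.find? q := by
  intro W
  induction W with
  | nil => rfl
  | cons wt W' ih =>
    by_cases hq : q wt = true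
    · rw [List.filter_cons, h wt hq]
      simp [hq]
    · rw [List.filter_cons]
      by_cases hp : pred wt = true
      · simp [hp, hq, ih]
      · simp [hp, hq, ih]

lemma saf_inner_noop (wt : Int × String) :
    ∀ (S : List (Int × String)) (adj : PySem.Dict Int String),
    (∀ p ∈ S, (safTrim p.2 == wt.2) = false) →
    S.foldl
      (fun adj p =>
        if safTrim p.2 == wt.2 then
          if p.1 != wt.1 then adj.erase p.1
          else adj.insert p.1 wt.2
        else adj) adj = adj := by
  intro S
  induction S with
  | nil => intro adj _; rfl
  | cons p S' ih =>
    intro adj h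
    rw [List.foldl_cons]
    rw [h p (by simp)]
    simp only [Bool.false_eq_true, if_false]
    exact ih adj (fun p' hp' => h p' (by simp [hp']))

lemma saf_fold_filter (S : List (Int × String)) :
    ∀ (W : List (Int × String)) (adj : PySem.Dict Int String),
    W.foldl
      (fun adjusted wt =>
        S.foldl
          (fun adj p =>
            if safTrim p.2 == wt.2 then
              if p.1 != wt.1 then adj.erase p.1
              else adj.insert p.1 wt.2
            else adj)
          adjusted) adj
    = (W.filter (fun wt => S.any (fun p => safTrim p.2 == wt.2))).foldl
      (fun adjusted wt =>
        S.foldl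
          (fun adj p =>
            if safTrim p.2 == wt.2 then
              if p.1 != wt.1 then adj.erase p.1
              else adj.insert p.1 wt.2
            else adj)
          adjusted) adj := by
  intro W
  induction W with
  | nil => intro adj; rfl
  | cons wt W' ih =>
    intro adj
    rw [List.foldl_cons, List.filter_cons]
    by_cases hp : (S.any (fun p => safTrim p.2 == wt.2)) = true
    · simp only [hp, if_true, List.foldl_cons]
      exact ih _
    · have hall : ∀ p ∈ S, (safTrim p.2 == wt.2) = false := by
        intro p hps
        by_contra hcc
        exact hp (List.any_eq_true.mpr ⟨p, hps, by simpa using hcc⟩)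
      simp only [hp, Bool.false_eq_true, if_false]
      rw [saf_inner_noop wt S adj hall]
      exact ih adj

lemma saf_get_foldl_absent (t : String) :
    ∀ (W : List (Int × String)) (d : PySem.Dict String Int),
    (∀ wt ∈ W, (wt.2 == t) = false) →
    (W.foldl (fun d wt => d.insert wt.2 wt.1) d).get? t = d.get? t := by
  intro W
  induction W with
  | nil => intro d _; rfl
  | cons wt W' ih =>
    intro d h
    rw [List.foldl_cons, ih _ (fun wt' hw => h wt' (by simp [hw]))]
    have : t ≠ wt.2 := by
      intro he; have := h wt (by simp); simp [he] at this
    exact PySem.Dict.get?_insert_of_ne _ _ this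

lemma saf_get_foldl_unique (t : String) :
    ∀ (W : List (Int × String)) (d : PySem.Dict String Int),
    W.countP (fun wt => wt.2 == t) ≤ 1 →
    (W.foldl (fun d wt => d.insert wt.2 wt.1) d).get? t
      = match W.find? (fun wt => wt.2 == t) with
        | some wt => some wt.1
        | none => d.get? t := by
  intro W
  induction W with
  | nil => intro d _; rfl
  | cons wt W' ih =>
    intro d hc
    rw [List.foldl_cons]
    by_cases hb : (wt.2 == t) = true
    · have hc2 : W'.countP (fun wt => wt.2 == t) + 1 ≤ 1 := by
        calc W'.countP (fun wt => wt.2 == t) + 1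
            = (wt :: W').countP (fun wt => wt.2 == t) := by rw [List.countP_cons]; simp [hb]
          _ ≤ 1 := hc
      have hzero : W'.countP (fun wt => wt.2 == t) = 0 := by omega
      have habs : ∀ wt' ∈ W', (wt'.2 == t) = false := by
        intro wt' hw
        have := List.countP_eq_zero.mp hzero wt' hw
        simpa using this
      rw [saf_get_foldl_absent t W' _ habs]
      have hfind : List.find? (fun wt => wt.2 == t) (wt :: W') = some wt := by
        rw [List.find?_cons]; simp [hb]
      rw [hfind]
      have ht : wt.2 = t := by simpa using hb
      show (d.insert wt.2 wt.1).get? t = some wt.1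
      rw [← ht]
      exact PySem.Dict.get?_insert_self _ _ _
    · have hc' : W'.countP (fun wt => wt.2 == t) ≤ 1 := by
        calc W'.countP (fun wt => wt.2 == t)
            = (wt :: W').countP (fun wt => wt.2 == t) := by rw [List.countP_cons]; simp [hb]
          _ ≤ 1 := hc
      have hfind : List.find? (fun wt => wt.2 == t) (wt :: W')
          = List.find? (fun wt => wt.2 == t) W' := by
        rw [List.find?_cons]; simp [hb]
      rw [ih _ hc', hfind]
      have : t ≠ wt.2 := by intro he; simp [he] at hb
      cases hf : W'.find? (fun wt => wt.2 == t) with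
      | some wt' => rfl
      | none => exact PySem.Dict.get?_insert_of_ne _ _ this

-- A's inner loop over the original seeds S, acting on a dict of shape P ++ S.filterMap f
lemma saf_inner (wt : Int × String) :
    ∀ (S P : List (Int × String)) (f : Int × String → Option (Int × String)),
    (S.map (·.1)).Nodup →
    (∀ p ∈ S, safTrim p.2 == wt.2 → ∀ q ∈ P, q.1 ≠ p.1) →
    (∀ p ∈ S, safTrim p.2 == wt.2 → f p = some p) →
    (∀ p q, f p = some q → q.1 = p.1) →
    (S.foldl
      (fun adj p =>
        if safTrim p.2 == wt.2 then
          if p.1 != wt.1 then adj.erase p.1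
          else adj.insert p.1 wt.2
        else adj)
      (PySem.Dict.mk (P ++ S.filterMap f))).items
    = P ++ S.filterMap (safStepF f wt) := by
  intro S
  induction S with
  | nil => intro P f _ _ _ _; simp
  | cons p S' ih =>
    intro P f hnd hP hf hkey
    have hnd' : (S'.map (·.1)).Nodup := (List.nodup_cons.mp hnd).2
    have hpnot : p.1 ∉ S'.map (·.1) := (List.nodup_cons.mp hnd).1
    have hrestkey : ∀ q ∈ S'.filterMap f, q.1 ≠ p.1 := by
      intro q hq
      obtain ⟨p', hp', hfp'⟩ := List.mem_filterMap.mp hq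
      rw [hkey p' q hfp']
      intro he; exact hpnot (he ▸ List.mem_map_of_mem hp')
    have hPq : ∀ q ∈ P, q.1 = p.1 → ¬ (safTrim p.2 == wt.2) = true :=
      fun q hq he hb => hP p (by simp) hb q hq he
    by_cases hm : safTrim p.2 = wt.2
    · have hb : (safTrim p.2 == wt.2) = true := by simp [hm]
      have hfp : f p = some p := hf p (by simp) hb
      have hcons : (p :: S').filterMap f = p :: S'.filterMap f := by
        rw [List.filterMap_cons, hfp]
      by_cases hw : p.1 = wt.1
      · -- winner: in-place overwrite
        have hbw : (p.1 != wt.1) = false := by simp [hw]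
        have hsf : safStepF f wt p = some (p.1, wt.2) := by simp [safStepF, hb, hbw]
        simp only [List.foldl_cons, hb, if_true, hbw, Bool.false_eq_true, if_false]
        have hcont : (PySem.Dict.mk (P ++ (p :: S').filterMap f)).contains p.1 = true := by
          simp [PySem.Dict.contains, List.any_append, hcons]
        have hitems : ((PySem.Dict.mk (P ++ (p :: S').filterMap f)).insert p.1 wt.2)
            = PySem.Dict.mk ((P ++ [(p.1, wt.2)]) ++ S'.filterMap f) := by
          apply PySem.Dict.ext
          rw [PySem.Dict.items_insert_of_contains _ _ hcont]
          show (P ++ (p :: S').filterMap f).map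
              (fun q => if q.1 == p.1 then (p.1, wt.2) else q) = _
          rw [hcons, List.map_append, List.map_cons]
          have h1 : ∀ q ∈ P, (if q.1 == p.1 then (p.1, wt.2) else q) = q := by
            intro q hq
            have : q.1 ≠ p.1 := fun he => hPq q hq he hb
            simp [this]
          have h2 : ∀ q ∈ S'.filterMap f,
              (if q.1 == p.1 then (p.1, wt.2) else q) = q := by
            intro q hq; simp [hrestkey q hq]
          rw [List.map_congr_left h1, List.map_id', List.map_congr_left h2, List.map_id']
          simp
        rw [hitems]
        rw [ih (P ++ [(p.1, wt.2)]) f hnd'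
          (by
            intro p' hp' hb' q hq
            rcases List.mem_append.mp hq with hq | hq
            · exact hP p' (by simp [hp']) hb' q hq
            · have : q = (p.1, wt.2) := by simpa using hq
              subst this
              intro he; exact hpnot ((he : p.1 = p'.1) ▸ List.mem_map_of_mem hp'))
          (fun p' hp' hb' => hf p' (by simp [hp']) hb') hkey]
        rw [List.filterMap_cons, hsf]
        simp
      · -- loser: delete
        have hbw : (p.1 != wt.1) = true := by simp [hw]
        have hsf : safStepF f wt p = none := by simp [safStepF, hb, hbw]
        simp only [List.foldl_cons, hb, if_true, hbw]
        have herase : ((PySem.Dict.mk (P ++ (p :: S').filterMap f)).erase p.1)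
            = PySem.Dict.mk (P ++ S'.filterMap f) := by
          apply PySem.Dict.ext
          show (P ++ (p :: S').filterMap f).filter (fun q => !(q.1 == p.1)) = _
          rw [hcons, List.filter_append, List.filter_cons]
          simp only [beq_self_eq_true, Bool.not_true, Bool.false_eq_true, if_false]
          rw [List.filter_eq_self.mpr (fun q hq => by
              have : q.1 ≠ p.1 := fun he => hPq q hq he hb
              simp [this]),
            List.filter_eq_self.mpr (fun q hq => by simp [hrestkey q hq])]
        rw [herase]
        rw [ih P f hnd' (fun p' hp' hb' q hq => hP p' (by simp [hp']) hb' q hq)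
          (fun p' hp' hb' => hf p' (by simp [hp']) hb') hkey]
        rw [List.filterMap_cons, hsf]
    · have hb : (safTrim p.2 == wt.2) = false := by simp [hm]
      have hsf : safStepF f wt p = f p := by simp [safStepF, hb]
      cases hfp : f p with
      | none =>
        have hcons : List.filterMap f (p :: S') = List.filterMap f S' := by
          rw [List.filterMap_cons, hfp]
        have hconsR : List.filterMap (safStepF f wt) (p :: S')
            = List.filterMap (safStepF f wt) S' := by
          rw [List.filterMap_cons, hsf, hfp]
        rw [hcons, hconsR, List.foldl_cons]
        simp only [hb, Bool.false_eq_true, if_false]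
        exact ih P f hnd' (fun p' hp' hb' q hq => hP p' (by simp [hp']) hb' q hq)
          (fun p' hp' hb' => hf p' (by simp [hp']) hb') hkey
      | some q =>
        have hq1 : q.1 = p.1 := hkey p q hfp
        have hcons : List.filterMap f (p :: S') = q :: List.filterMap f S' := by
          rw [List.filterMap_cons, hfp]
        have hconsR : List.filterMap (safStepF f wt) (p :: S')
            = q :: List.filterMap (safStepF f wt) S' := by
          rw [List.filterMap_cons, hsf, hfp]
        rw [hcons, hconsR, List.foldl_cons]
        simp only [hb, Bool.false_eq_true, if_false]
        have := ih (P ++ [q]) f hnd'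
          (by
            intro p' hp' hb' r hr
            rcases List.mem_append.mp hr with hr | hr
            · exact hP p' (by simp [hp']) hb' r hr
            · have : r = q := by simpa using hr
              subst this
              rw [hq1]
              intro he; exact hpnot (he ▸ List.mem_map_of_mem hp'))
          (fun p' hp' hb' => hf p' (by simp [hp']) hb') hkey
        rw [List.append_assoc] at this
        simpa using this

-- A's whole computation is a filterMap over the original seeds
lemma saf_outer :
    ∀ (W : List (Int × String)) (f : Int × String → Option (Int × String)) (S : List (Int × String)),
    (S.map (·.1)).Nodup → (W.map (·.2)).Nodup →
    (∀ p q, f p = some q → q.1 = p.1) →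
    (∀ p ∈ S, ∀ wt ∈ W, safTrim p.2 == wt.2 → f p = some p) →
    (W.foldl
      (fun adjusted wt =>
        S.foldl
          (fun adj p =>
            if safTrim p.2 == wt.2 then
              if p.1 != wt.1 then adj.erase p.1
              else adj.insert p.1 wt.2
            else adj)
          adjusted)
      (PySem.Dict.mk (S.filterMap f))).items
    = S.filterMap (W.foldl safStepF f) := by
  intro W
  induction W with
  | nil => intro f S _ _ _ _; rfl
  | cons wt W' ih =>
    intro f S hndS hndW hkey hf
    have hndW' : (W'.map (·.2)).Nodup := (List.nodup_cons.mp hndW).2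
    have hwt : wt.2 ∉ W'.map (·.2) := (List.nodup_cons.mp hndW).1
    rw [List.foldl_cons]
    have hinner := saf_inner wt S [] f hndS (by simp)
      (fun p hp hb => hf p hp wt (by simp) hb) hkey
    have hdict : (S.foldl
        (fun adj p =>
          if safTrim p.2 == wt.2 then
            if p.1 != wt.1 then adj.erase p.1
            else adj.insert p.1 wt.2
          else adj)
        (PySem.Dict.mk (S.filterMap f)))
        = PySem.Dict.mk (S.filterMap (safStepF f wt)) := by
      apply PySem.Dict.ext
      simpa using hinner
    rw [hdict]
    rw [ih (safStepF f wt) S hndS hndW'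
      (by
        intro p q h
        by_cases hb : (safTrim p.2 == wt.2) = true
        · by_cases hw : (p.1 != wt.1) = true
          · simp [safStepF, hb, hw] at h
          · simp only [safStepF, hb, if_true, hw, Bool.false_eq_true, if_false] at h
            cases h; rfl
        · simp only [safStepF, Bool.not_eq_true] at h hb
          rw [hb] at h
          simp only [Bool.false_eq_true, if_false] at h
          exact hkey p q h)
      (by
        intro p hp wt' hwt' hb'
        have hne : safTrim p.2 ≠ wt.2 := by
          intro he
          have : wt'.2 = wt.2 := by
            have := (beq_iff_eq).mp hb'
            rw [← this, he]
          exact hwt (this ▸ List.mem_map_of_mem hwt')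
        have hbf : (safTrim p.2 == wt.2) = false := by simp [hne]
        simp only [safStepF, hbf, Bool.false_eq_true, if_false]
        exact hf p hp wt' (by simp [hwt']) hb')]
    rfl

-- the accumulated decision is decided by the unique matching first-four entry
lemma saf_res_eq :
    ∀ (W : List (Int × String)) (f : Int × String → Option (Int × String)) (p : Int × String),
    (W.map (·.2)).Nodup →
    (W.foldl safStepF f) p
      = match W.find? (fun wt => wt.2 == safTrim p.2) with
        | some wt => if p.1 != wt.1 then none else some (p.1, wt.2)
        | none => f p := by
  intro W
  induction W with
  | nil => intro f p _; rfl
  | cons wt W' ih =>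
    intro f p hnd
    have hnd' : (W'.map (·.2)).Nodup := (List.nodup_cons.mp hnd).2
    have hmem : wt.2 ∉ W'.map (·.2) := (List.nodup_cons.mp hnd).1
    simp only [List.foldl_cons, List.find?_cons]
    by_cases hm : wt.2 = safTrim p.2
    · have hb : (wt.2 == safTrim p.2) = true := by simp [hm]
      rw [hb]
      have hnone : W'.find? (fun wt' => wt'.2 == safTrim p.2) = none := by
        rw [List.find?_eq_none]
        intro x hx hbx
        exact hmem (by rw [hm, ← (by simpa using hbx : x.2 = safTrim p.2)]; exact List.mem_map_of_mem hx)
      rw [ih (safStepF f wt) p hnd', hnone]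
      simp [safStepF, hm]
    · have hb : (wt.2 == safTrim p.2) = false := by simp [hm]
      rw [hb]
      rw [ih (safStepF f wt) p hnd']
      cases List.find? (fun wt' => wt'.2 == safTrim p.2) W' with
      | some wt' => rfl
      | none => simp [safStepF]; intro h; exact absurd h.symm hm

-- B's single pass builds exactly a filterMap
lemma saf_alt_build (dW : PySem.Dict String Int) :
    ∀ (S : List (Int × String)) (acc : PySem.Dict Int String),
    (S.map (·.1)).Nodup →
    (∀ p ∈ S, acc.contains p.1 = false) →
    (S.foldl
      (fun result p =>
        match dW.get? (safTrim p.2) with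
        | some w => if w == p.1 then result.insert p.1 (safTrim p.2) else result
        | none => result.insert p.1 p.2)
      acc).items
    = acc.items ++ S.filterMap (fun p =>
        match dW.get? (safTrim p.2) with
        | some w => if w == p.1 then some (p.1, safTrim p.2) else none
        | none => some p) := by
  intro S
  induction S with
  | nil => intro acc _ _; simp
  | cons p S' ih =>
    intro acc hnd hacc
    have hnd' : (S'.map (·.1)).Nodup := (List.nodup_cons.mp hnd).2
    have hkey : p.1 ∉ S'.map (·.1) := (List.nodup_cons.mp hnd).1
    have hfresh : acc.contains p.1 = false := hacc p (by simp)
    have hacc' : ∀ (v : String), ∀ q ∈ S', (acc.insert p.1 v).contains q.1 = false := by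
      intro v q hq
      rw [PySem.Dict.contains_insert]
      have : q.1 ≠ p.1 := by
        intro he; exact hkey (by simpa [he] using List.mem_map_of_mem (f := (·.1)) hq)
      simp [this, hacc q (by simp [hq])]
    have hins : ∀ v, (acc.insert p.1 v).items = acc.items ++ [(p.1, v)] :=
      fun v => PySem.Dict.items_insert_of_not_contains _ _ hfresh
    simp only [List.foldl_cons, List.filterMap_cons]
    cases hg : dW.get? (safTrim p.2) with
    | none =>
      show (List.foldl _ (acc.insert p.1 p.2) S').items = acc.items ++ (p :: _)
      rw [ih _ hnd' (fun q hq => hacc' p.2 q hq), hins]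
      simp
    | some w =>
      by_cases hw : w = p.1
      · have hbw : (w == p.1) = true := by simp [hw]
        simp only [hbw, if_true]
        rw [ih _ hnd' (fun q hq => hacc' (safTrim p.2) q hq), hins]
        simp
      · have hbw : (w == p.1) = false := by simp [hw]
        simp only [hbw, Bool.false_eq_true, if_false]
        exact ih _ hnd' (fun q hq => hacc q (by simp [hq]))

-- ===== VERDICT (by name: the statement is the Claim_ definition above) =====
theorem seeds_after_first_four_spec : Claim_equal_seeds_after_first_four := by
  intro seeds W _dom hpre
  obtain ⟨hndS, hndWm⟩ := hpre
  unfold Spec_seeds_after_first_four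
  unfold seeds_after_first_four seeds_after_first_four_alt
  rw [saf_fold_filter seeds W]
  rw [show (PySem.Dict.mk seeds) = PySem.Dict.mk (seeds.filterMap some) from by
    rw [List.filterMap_some]]
  rw [saf_outer (W.filter (fun wt => seeds.any (fun p => safTrim p.2 == wt.2))) some seeds
    hndS hndWm (fun p q h => by cases h; rfl) (fun _ _ _ _ _ => rfl)]
  rw [saf_alt_build _ seeds (PySem.Dict.mk []) hndS
    (fun p _ => by simp [PySem.Dict.contains])]
  simp only [List.nil_append]
  symm
  apply List.filterMap_congr
  intro p hp
  rw [saf_res_eq (W.filter (fun wt => seeds.any (fun p => safTrim p.2 == wt.2))) some p hndWm]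
  have hq2p : ∀ wt : Int × String, (wt.2 == safTrim p.2) = true →
      (seeds.any (fun q => safTrim q.2 == wt.2)) = true := by
    intro wt h
    refine List.any_eq_true.mpr ⟨p, hp, ?_⟩
    have : wt.2 = safTrim p.2 := by simpa using h
    simp [this]
  have hcount : W.countP (fun wt => wt.2 == safTrim p.2) ≤ 1 := by
    have h1 : W.countP (fun wt => wt.2 == safTrim p.2)
        = (W.filter (fun wt => seeds.any (fun p => safTrim p.2 == wt.2))).countP
            (fun wt => wt.2 == safTrim p.2) := by
      rw [List.countP_filter]
      apply List.countP_congr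
      intro wt _
      cases hq : (wt.2 == safTrim p.2) with
      | false => simp
      | true => simp [hq2p wt hq]
    have h2 : (W.filter (fun wt => seeds.any (fun p => safTrim p.2 == wt.2))).countP
        (fun wt => wt.2 == safTrim p.2) ≤ 1 := by
      have := List.nodup_iff_count_le_one.mp hndWm (safTrim p.2)
      rw [List.count_eq_countP, List.countP_map] at this
      exact this
    omega
  rw [saf_get_foldl_unique (safTrim p.2) W (PySem.Dict.mk []) hcount]
  rw [← saf_find_filter (fun wt => wt.2 == safTrim p.2)
    (fun wt => seeds.any (fun p => safTrim p.2 == wt.2)) hq2p W]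
  cases hfind : (W.filter (fun wt => seeds.any (fun p => safTrim p.2 == wt.2))).find?
      (fun wt => wt.2 == safTrim p.2) with
  | none => rfl
  | some wt =>
    have hwt2 : wt.2 = safTrim p.2 := by
      have := List.find?_some hfind
      simpa using this
    by_cases hw : wt.1 = p.1
    · have h1 : (wt.1 == p.1) = true := by simp [hw]
      have h2 : (p.1 != wt.1) = false := by simp [hw]
      simp [h1, h2, hwt2]
    · have h1 : (wt.1 == p.1) = false := by simp [hw]
      have h2 : (p.1 != wt.1) = true := by
        have : ¬ p.1 = wt.1 := fun h => hw h.symm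
        simp [this]
      simp [h1, h2]
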